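-- pv_equiv track=rewrite | github.com/im281/PrecisionMedicine | ProteoGenomics/Genomics/Chapter1_3.py | kmerCount
-- ===== SOURCE A (Python) =====
-- def kmerCount(k,t):
--     #Counts the number if occurences if a k-mer in a dna sequence (naive)
--     d = {}
--     occurrences = []
--     count = 0
--     for j in range(len(t) - k + 1):
--         p = t[j:j+k]
--         for i in range(len(t) - len(p) + 1):
--             if(p == t[i: i + len(p)]):
--                 count+= 1
--                 occurrences.append(i)
--         d.update({p:occurrences})
--         occurrences = []
--     return d
-- ===== SOURCE B (Python) =====
-- def kmerCount(k, t):
--     # Single pass: group positions j by the k-mer t[j:j+k] as we scan.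
--     d = {}
--     for j in range(len(t) - k + 1):
--         d.setdefault(t[j:j+k], []).append(j)
--     return d
-- ===== Notes on version B (the rewrite author's own statement) =====
-- stated objective: faster
-- what changed: Instead of re-scanning the whole string for occurrences of every k-mer at every window position, B makes a single pass appending each position j to dict[t[j:j+k]], so the inner occurrence scan disappears.
-- outside the precondition, e.g. on kmerCount(-1, 'ab'): A returns {'a': [0], '': [0, 1, 2]}, B returns {'a': [0], '': [1, 2, 3]}
import Mathlib
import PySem

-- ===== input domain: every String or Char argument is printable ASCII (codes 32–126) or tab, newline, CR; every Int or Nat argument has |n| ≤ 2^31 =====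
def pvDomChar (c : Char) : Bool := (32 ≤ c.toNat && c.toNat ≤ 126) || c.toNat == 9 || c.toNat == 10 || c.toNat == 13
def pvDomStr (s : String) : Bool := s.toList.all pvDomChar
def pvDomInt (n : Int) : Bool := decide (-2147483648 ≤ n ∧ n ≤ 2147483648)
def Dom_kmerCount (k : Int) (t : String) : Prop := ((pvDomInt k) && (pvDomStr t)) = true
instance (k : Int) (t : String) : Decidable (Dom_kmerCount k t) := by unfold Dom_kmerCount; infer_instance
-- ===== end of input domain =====

-- B replaces A's per-window re-scan of the whole string with a single pass that
-- appends each position j to dict[t[j:j+k]] (objective: faster; Pre_ restricts to k ≥ 0).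


-- ===== PORT A =====
-- state of A's outer loop: (d, occurrences, count); inner loop threads (count, occurrences)
def kmerCount (k : Int) (t : String) : List (String × List Int) :=
  (((PySem.List.pyRange 0 (PySem.Str.len t - k + 1) 1).foldl
    (fun (st : PySem.Dict String (List Int) × List Int × Int) j =>
      let p := PySem.Str.slice t (some j) (some (j + k))
      let inner := (PySem.List.pyRange 0 (PySem.Str.len t - PySem.Str.len p + 1) 1).foldl
        (fun (ci : Int × List Int) i =>
          if p == PySem.Str.slice t (some i) (some (i + PySem.Str.len p))
          then (ci.1 + 1, ci.2 ++ [i]) else ci)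
        (st.2.2, st.2.1)
      (st.1.update [(p, inner.2)], [], inner.1))
    (PySem.Dict.empty, ([], 0))).1).items

-- ===== PORT B =====
-- d.setdefault(t[j:j+k], []).append(j)  ==  modify with default [] appending j
def kmerCount_alt (k : Int) (t : String) : List (String × List Int) :=
  ((PySem.List.pyRange 0 (PySem.Str.len t - k + 1) 1).foldl
    (fun (d : PySem.Dict String (List Int)) j =>
      d.modify (PySem.Str.slice t (some j) (some (j + k))) [] (· ++ [j]))
    PySem.Dict.empty).items

-- ===== PRECONDITION & SPEC =====
-- Pre_ excludes negative k, where "k-mer" is meaningless and both programs' values are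
-- accidents of Python's slice truncation (A re-scans by the truncated slice's length,
-- B groups by position): neither behaviour is a specified one, so no value is claimed there.
def Pre_kmerCount (k : Int) (t : String) : Prop := 0 ≤ k
instance (k : Int) (_t : String) : Decidable (Pre_kmerCount k _t) := by unfold Pre_kmerCount; infer_instance
def pvWitness_kmerCount : Int × String := (2, "ACGTAC")
def Spec_kmerCount (k : Int) (t : String) (out : List (String × List Int)) : Prop := out = kmerCount_alt k t
instance (k : Int) (t : String) (out : List (String × List Int)) : Decidable (Spec_kmerCount k t out) := by unfold Spec_kmerCount; infer_instance

-- ===== CLAIM (what is proved, stated in full; the proofs are below) =====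
def Claim_equal_kmerCount : Prop := ∀ (k : Int) (t : String), Dom_kmerCount k t → Pre_kmerCount k t → Spec_kmerCount k t (kmerCount k t)

-- ===== LEMMAS AND PROOFS =====

-- the k-mer starting at position j
def kcKey (k : Int) (t : String) (j : Int) : String := PySem.Str.slice t (some j) (some (j + k))

-- A's inner loop computes exactly this occurrence list (depends only on the slice p)
def kcOcc (t p : String) : List Int :=
  (PySem.List.pyRange 0 (PySem.Str.len t - PySem.Str.len p + 1) 1).filter
    (fun i => p == PySem.Str.slice t (some i) (some (i + PySem.Str.len p)))

theorem kcInner_snd (t p : String) (c0 : Int) :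
    ((PySem.List.pyRange 0 (PySem.Str.len t - PySem.Str.len p + 1) 1).foldl
      (fun (ci : Int × List Int) i =>
        if p == PySem.Str.slice t (some i) (some (i + PySem.Str.len p))
        then (ci.1 + 1, ci.2 ++ [i]) else ci)
      (c0, [])).2 = kcOcc t p := by
  have hb : (fun (ci : Int × List Int) i =>
        if p == PySem.Str.slice t (some i) (some (i + PySem.Str.len p))
        then (ci.1 + 1, ci.2 ++ [i]) else ci)
      = fun (ci : Int × List Int) i =>
        ((fun (c : Int) (i : Int) => if p == PySem.Str.slice t (some i) (some (i + PySem.Str.len p)) then c + 1 else c) ci.1 i,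
         (fun (o : List Int) (i : Int) => if p == PySem.Str.slice t (some i) (some (i + PySem.Str.len p)) then o ++ [i] else o) ci.2 i) := by
    funext ci i
    by_cases h : (p == PySem.Str.slice t (some i) (some (i + PySem.Str.len p))) = true
    · simp only [if_pos h]
    · simp only [if_neg h]
  rw [hb, PySem.List.foldl_prod_mk
    (f := fun (c : Int) (i : Int) => if p == PySem.Str.slice t (some i) (some (i + PySem.Str.len p)) then c + 1 else c)
    (g := fun (o : List Int) (i : Int) => if p == PySem.Str.slice t (some i) (some (i + PySem.Str.len p)) then o ++ [i] else o)]
  exact PySem.List.foldl_append_if_eq_filter _ _ []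

theorem kcA_fold (k : Int) (t : String) (L : List Int) :
    ∀ (d : PySem.Dict String (List Int)) (c : Int),
    (L.foldl
      (fun (st : PySem.Dict String (List Int) × List Int × Int) j =>
        let p := PySem.Str.slice t (some j) (some (j + k))
        let inner := (PySem.List.pyRange 0 (PySem.Str.len t - PySem.Str.len p + 1) 1).foldl
          (fun (ci : Int × List Int) i =>
            if p == PySem.Str.slice t (some i) (some (i + PySem.Str.len p))
            then (ci.1 + 1, ci.2 ++ [i]) else ci)
          (st.2.2, st.2.1)
        (st.1.update [(p, inner.2)], [], inner.1))
      (d, ([], c))).1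
    = L.foldl (fun d j => d.insert (kcKey k t j) (kcOcc t (kcKey k t j))) d := by
  induction L with
  | nil => intro d c; rfl
  | cons j L ih =>
    intro d c
    simp only [List.foldl_cons]
    rw [kcInner_snd t (PySem.Str.slice t (some j) (some (j + k))) c]
    have hupd : d.update [(PySem.Str.slice t (some j) (some (j + k)), kcOcc t (PySem.Str.slice t (some j) (some (j + k))))]
        = d.insert (kcKey k t j) (kcOcc t (kcKey k t j)) := by
      simp [PySem.Dict.update, kcKey]
    rw [hupd]
    exact ih _ _

theorem kcGetD_foldl_insert (L : List Int) (K : Int → String) (V : String → List Int) :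
    ∀ (d : PySem.Dict String (List Int)) (c : String),
    (L.foldl (fun d j => d.insert (K j) (V (K j))) d).getD c []
      = if c ∈ L.map K then V c else d.getD c [] := by
  induction L with
  | nil => intro d c; simp
  | cons j L ih =>
    intro d c
    simp only [List.foldl_cons, List.map_cons, List.mem_cons]
    rw [ih]
    by_cases hm : c ∈ L.map K
    · simp [hm]
    · by_cases he : c = K j
      · simp [he, PySem.Dict.getD_insert_self]
      · simp only [hm, he, or_self, if_false]
        exact PySem.Dict.getD_insert_of_ne d (V (K j)) [] he

theorem kcGetD_foldl_modify (L : List Int) (K : Int → String) (c : String) :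
    (L.foldl (fun (d : PySem.Dict String (List Int)) j => d.modify (K j) [] (· ++ [j]))
      PySem.Dict.empty).getD c []
    = L.filter (fun j => K j == c) := by
  have h : (L.foldl (fun (d : PySem.Dict String (List Int)) j => d.modify (K j) [] (· ++ [j])) PySem.Dict.empty)
      = ((L.map (fun j => (K j, j))).foldl (fun d p => d.modify p.1 [] (· ++ [p.2])) PySem.Dict.empty) := by
    rw [List.foldl_map]
  rw [h, PySem.Dict.getD_foldl_modify_append]
  simp [List.filter_map, Function.comp_def]

theorem kcLen_key (k : Int) (t : String) (hk : 0 ≤ k) (j : Int)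
    (hj : j ∈ PySem.List.pyRange 0 (PySem.Str.len t - k + 1) 1) :
    PySem.Str.len (kcKey k t j) = k := by
  rw [PySem.List.mem_pyRange_one] at hj
  obtain ⟨hj0, hjlt⟩ := hj
  have hjk : j + k ≤ PySem.Str.len t := by omega
  have hN : PySem.Str.len t = (t.toList.length : Int) := PySem.Str.len_eq t
  rw [hN] at hjk
  have hj' : j = ((j.toNat : Nat) : Int) := (Int.toNat_of_nonneg hj0).symm
  have hk' : k = ((k.toNat : Nat) : Int) := (Int.toNat_of_nonneg hk).symm
  rw [PySem.Str.len_eq, kcKey, PySem.Str.toList_slice, PySem.Chars.slice_eq_listSlice]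
  rw [hj', hk']
  have hcast : ((j.toNat : Nat) : Int) + ((k.toNat : Nat) : Int) = (((j.toNat + k.toNat : Nat)) : Int) := by push_cast; ring
  rw [hcast, PySem.List.length_slice, PySem.List.clampIdx_natCast, PySem.List.clampIdx_natCast]
  have : j.toNat + k.toNat ≤ t.toList.length := by omega
  omega

theorem kcOcc_eq_filter (k : Int) (t : String) (hk : 0 ≤ k) (c : String)
    (hc : c ∈ (PySem.List.pyRange 0 (PySem.Str.len t - k + 1) 1).map (kcKey k t)) :
    kcOcc t c = (PySem.List.pyRange 0 (PySem.Str.len t - k + 1) 1).filter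
      (fun j => kcKey k t j == c) := by
  obtain ⟨j0, hj0, hc0⟩ := List.mem_map.mp hc
  have hlen : PySem.Str.len c = k := hc0 ▸ kcLen_key k t hk j0 hj0
  unfold kcOcc
  rw [hlen]
  apply List.filter_congr
  intro j hj
  show (c == kcKey k t j) = (kcKey k t j == c)
  by_cases h : c = kcKey k t j <;> simp [h, Ne.symm]

-- ===== VERDICT (by name: the statement is the Claim_ definition above) =====
theorem kmerCount_spec : Claim_equal_kmerCount := by
  intro k t _hdom hk
  unfold Spec_kmerCount kmerCount kmerCount_alt
  rw [kcA_fold]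
  set L := PySem.List.pyRange 0 (PySem.Str.len t - k + 1) 1 with hL
  have hKA := PySem.Dict.keys_foldl_insert_key L (kcKey k t)
    (fun d j => kcOcc t (kcKey k t j)) PySem.Dict.empty
  have hKB := PySem.Dict.keys_foldl_modify_key L (kcKey k t) []
    (fun d j v => v ++ [j]) PySem.Dict.empty
  have hkeys : (L.foldl (fun d j => d.insert (kcKey k t j) (kcOcc t (kcKey k t j))) PySem.Dict.empty).keys
      = (L.foldl (fun (d : PySem.Dict String (List Int)) j => d.modify (kcKey k t j) [] (· ++ [j])) PySem.Dict.empty).keys := by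
    rw [hKA, hKB]
  rw [PySem.Dict.items_eq_map_keys _ (PySem.Dict.nodup_keys_foldl_insert_key _ _ _ _ PySem.Dict.nodup_keys_empty) [],
      PySem.Dict.items_eq_map_keys _ (PySem.Dict.nodup_keys_foldl_modify_key _ _ _ _ _ PySem.Dict.nodup_keys_empty) []]
  rw [hkeys]
  apply List.map_congr_left
  intro c hc
  have hcmem : c ∈ L.map (kcKey k t) := by
    rw [hKB, PySem.Dict.keys_empty, PySem.Set.update_nil_left] at hc
    simpa [PySem.Set.mem_ofList] using hc
  rw [kcGetD_foldl_insert, kcGetD_foldl_modify, if_pos hcmem,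
      kcOcc_eq_filter k t hk c hcmem]
  rfl
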